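-- pv_equiv track=rewrite | github.com/jasonjcacas-lab/DMI-proj | Tabs/MvrRunner_Shared.py | format_dob_value
-- ===== SOURCE A (Python) =====
-- def format_dob_value(value):
--     """Format a DOB value to __/__/____ format"""
--     if not value:
--         return "__/__/____"
--     digits = ''.join(filter(str.isdigit, value))
--     if len(digits) == 0:
--         return "__/__/____"
--     digits = digits[:8]
--
--     formatted = ""
--     if len(digits) >= 1:
--         formatted = digits[0]
--     if len(digits) >= 2:
--         formatted = digits[0:2]
--     if len(digits) >= 3:
--         formatted = digits[0:2] + "/" + digits[2]
--     if len(digits) >= 4: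
--         formatted = digits[0:2] + "/" + digits[2:4]
--     if len(digits) >= 5:
--         formatted = digits[0:2] + "/" + digits[2:4] + "/" + digits[4]
--     if len(digits) >= 6:
--         formatted = digits[0:2] + "/" + digits[2:4] + "/" + digits[4:6]
--     if len(digits) >= 7:
--         formatted = digits[0:2] + "/" + digits[2:4] + "/" + digits[4:7]
--     if len(digits) >= 8:
--         formatted = digits[0:2] + "/" + digits[2:4] + "/" + digits[4:8]
--
--     while len(formatted) < 10:
--         if len(formatted) == 2:
--             formatted += "/"
--         elif len(formatted) == 5:
--             formatted += "/"
--         else: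
--             formatted += "_"
--
--     return formatted
-- ===== SOURCE B (Python) =====
-- def format_dob_value(value):
--     """Format a DOB value to __/__/____ format"""
--     digits = [c for c in (value or "") if c.isdigit()][:8]
--     out = list("__/__/____")
--     for slot, d in zip([0, 1, 3, 4, 6, 7, 8, 9], digits):
--         out[slot] = d
--     return ''.join(out)
-- ===== Notes on version B (the rewrite author's own statement) =====
-- stated objective: simpler
-- what changed: B replaces A's 8-branch length cascade plus the padding while-loop with a single pass that writes the (at most 8) extracted digits into the fixed underscore/slash date mask at precomputed slot positions.
import Mathlib
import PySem

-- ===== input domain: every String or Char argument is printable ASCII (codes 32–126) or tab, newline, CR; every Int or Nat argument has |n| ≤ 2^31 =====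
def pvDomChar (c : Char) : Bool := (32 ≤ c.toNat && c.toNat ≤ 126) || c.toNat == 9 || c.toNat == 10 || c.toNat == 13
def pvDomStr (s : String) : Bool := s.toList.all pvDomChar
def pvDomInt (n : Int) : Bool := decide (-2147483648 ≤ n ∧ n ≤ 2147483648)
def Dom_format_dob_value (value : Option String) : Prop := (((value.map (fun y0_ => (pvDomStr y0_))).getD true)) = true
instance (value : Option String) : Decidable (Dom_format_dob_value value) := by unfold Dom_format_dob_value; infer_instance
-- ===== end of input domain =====

-- B replaces A's 8-branch length cascade and padding while-loop by filling digits into a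
-- fixed underscore/slash date mask at the digit slots (objective: simpler).

-- ===== PORT A =====
-- the trailing `while len(formatted) < 10` padding loop of A
def pvPadLoop (f : List Char) : List Char :=
  if f.length < 10 then
    pvPadLoop (f ++ [if f.length = 2 then '/' else if f.length = 5 then '/' else '_'])
  else f
termination_by 10 - f.length
decreasing_by simp_all; omega

def format_dob_value (value : Option String) : String :=
  match value with
  | none => "__/__/____"                         -- `if not value` (None)
  | some v =>
    if v.toList = [] then "__/__/____"           -- `if not value` (empty string)
    else
      let digits0 := v.toList.filter PySem.Chars.isdigit
      if digits0.length = 0 then "__/__/____"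
      else
        let digits := PySem.List.slice digits0 none (some 8)     -- digits[:8]
        let formatted : List Char := []
        let formatted := if 1 ≤ digits.length then (PySem.List.pyGet? digits 0).toList else formatted
        let formatted := if 2 ≤ digits.length then PySem.List.slice digits (some 0) (some 2) else formatted
        let formatted := if 3 ≤ digits.length then
            PySem.List.slice digits (some 0) (some 2) ++ ['/'] ++ (PySem.List.pyGet? digits 2).toList else formatted
        let formatted := if 4 ≤ digits.length then
            PySem.List.slice digits (some 0) (some 2) ++ ['/'] ++ PySem.List.slice digits (some 2) (some 4) else formatted
        let formatted := if 5 ≤ digits.length then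
            PySem.List.slice digits (some 0) (some 2) ++ ['/'] ++ PySem.List.slice digits (some 2) (some 4)
              ++ ['/'] ++ (PySem.List.pyGet? digits 4).toList else formatted
        let formatted := if 6 ≤ digits.length then
            PySem.List.slice digits (some 0) (some 2) ++ ['/'] ++ PySem.List.slice digits (some 2) (some 4)
              ++ ['/'] ++ PySem.List.slice digits (some 4) (some 6) else formatted
        let formatted := if 7 ≤ digits.length then
            PySem.List.slice digits (some 0) (some 2) ++ ['/'] ++ PySem.List.slice digits (some 2) (some 4)
              ++ ['/'] ++ PySem.List.slice digits (some 4) (some 7) else formatted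
        let formatted := if 8 ≤ digits.length then
            PySem.List.slice digits (some 0) (some 2) ++ ['/'] ++ PySem.List.slice digits (some 2) (some 4)
              ++ ['/'] ++ PySem.List.slice digits (some 4) (some 8) else formatted
        String.mk (pvPadLoop formatted)

-- ===== PORT B =====
def format_dob_value_alt (value : Option String) : String :=
  let digits := (((value.getD "").toList.filter PySem.Chars.isdigit).take 8)
  let out := "__/__/____".toList
  String.mk (((List.zip [0, 1, 3, 4, 6, 7, 8, 9] digits).foldl (fun o p => o.set p.1 p.2) out))

-- ===== PRECONDITION & SPEC =====
def Spec_format_dob_value (value : Option String) (out : String) : Prop := out = format_dob_value_alt value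
instance (value : Option String) (out : String) : Decidable (Spec_format_dob_value value out) := by unfold Spec_format_dob_value; infer_instance

-- ===== CLAIM (what is proved, stated in full; the proofs are below) =====
def Claim_equal_format_dob_value : Prop := ∀ (value : Option String), Dom_format_dob_value value → Spec_format_dob_value value (format_dob_value value)

-- ===== LEMMAS AND PROOFS =====

-- the core of both programs agrees on every digit list of length ≤ 8
lemma pv_core_eq (ds : List Char) (h : ds.length ≤ 8) (hne : ds ≠ []) :
    String.mk (pvPadLoop (
        let formatted : List Char := []
        let formatted := if 1 ≤ ds.length then (PySem.List.pyGet? ds 0).toList else formatted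
        let formatted := if 2 ≤ ds.length then PySem.List.slice ds (some 0) (some 2) else formatted
        let formatted := if 3 ≤ ds.length then
            PySem.List.slice ds (some 0) (some 2) ++ ['/'] ++ (PySem.List.pyGet? ds 2).toList else formatted
        let formatted := if 4 ≤ ds.length then
            PySem.List.slice ds (some 0) (some 2) ++ ['/'] ++ PySem.List.slice ds (some 2) (some 4) else formatted
        let formatted := if 5 ≤ ds.length then
            PySem.List.slice ds (some 0) (some 2) ++ ['/'] ++ PySem.List.slice ds (some 2) (some 4)
              ++ ['/'] ++ (PySem.List.pyGet? ds 4).toList else formatted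
        let formatted := if 6 ≤ ds.length then
            PySem.List.slice ds (some 0) (some 2) ++ ['/'] ++ PySem.List.slice ds (some 2) (some 4)
              ++ ['/'] ++ PySem.List.slice ds (some 4) (some 6) else formatted
        let formatted := if 7 ≤ ds.length then
            PySem.List.slice ds (some 0) (some 2) ++ ['/'] ++ PySem.List.slice ds (some 2) (some 4)
              ++ ['/'] ++ PySem.List.slice ds (some 4) (some 7) else formatted
        let formatted := if 8 ≤ ds.length then
            PySem.List.slice ds (some 0) (some 2) ++ ['/'] ++ PySem.List.slice ds (some 2) (some 4)
              ++ ['/'] ++ PySem.List.slice ds (some 4) (some 8) else formatted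
        formatted)) =
    String.mk (((List.zip [0, 1, 3, 4, 6, 7, 8, 9] ds).foldl (fun o p => o.set p.1 p.2) "__/__/____".toList)) := by
  match ds, h, hne with
  | [a], _, _ => simp [pvPadLoop, PySem.List.slice, PySem.List.pyGet?, PySem.List.pyIdx?]
  | [a,b], _, _ => simp [pvPadLoop, PySem.List.slice, PySem.List.pyGet?, PySem.List.pyIdx?]
  | [a,b,c], _, _ => simp [pvPadLoop, PySem.List.slice, PySem.List.pyGet?, PySem.List.pyIdx?]
  | [a,b,c,d], _, _ => simp [pvPadLoop, PySem.List.slice, PySem.List.pyGet?, PySem.List.pyIdx?]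
  | [a,b,c,d,e], _, _ => simp [pvPadLoop, PySem.List.slice, PySem.List.pyGet?, PySem.List.pyIdx?]
  | [a,b,c,d,e,f], _, _ => simp [pvPadLoop, PySem.List.slice, PySem.List.pyGet?, PySem.List.pyIdx?]
  | [a,b,c,d,e,f,g], _, _ => simp [pvPadLoop, PySem.List.slice, PySem.List.pyGet?, PySem.List.pyIdx?]
  | [a,b,c,d,e,f,g,h'], _, _ => simp [pvPadLoop, PySem.List.slice, PySem.List.pyGet?, PySem.List.pyIdx?]

-- ===== VERDICT (by name: the statement is the Claim_ definition above) =====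
theorem format_dob_value_spec : Claim_equal_format_dob_value := by
  intro value _
  unfold Spec_format_dob_value
  cases value with
  | none => rfl
  | some v =>
    simp only [format_dob_value, format_dob_value_alt, Option.getD_some]
    by_cases hv : v.toList = []
    · rw [if_pos hv]
      have h : (v.toList.filter PySem.Chars.isdigit) = [] := by simp [hv]
      simp only [h]
      decide
    · rw [if_neg hv]
      set ds0 := v.toList.filter PySem.Chars.isdigit with hds0
      by_cases h0 : ds0.length = 0
      · rw [if_pos h0]
        simp only [List.length_eq_zero_iff.mp h0]
        decide
      · rw [if_neg h0]
        have hslice : PySem.List.slice ds0 none (some 8) = ds0.take 8 := by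
          simpa using PySem.List.slice_to_natCast ds0 8
        have htake : (ds0.take 8).length ≤ 8 := by simp
        have hne : ds0.take 8 ≠ [] := by
          intro hc
          rcases List.take_eq_nil_iff.mp hc with h8 | hnil
          · norm_num at h8
          · exact h0 (by simp [hnil])
        simp only [hslice]
        exact pv_core_eq (ds0.take 8) htake hne
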